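-- pv_equiv track=rewrite | github.com/charonstr/flux | core/casino/roulette.py | _is_valid_sixline
-- ===== SOURCE A (Python) =====
-- from typing import Any
--
-- ROULETTE_VARIANT = "EU"
--
-- def _normalize_num(n: Any) -> str:
--     s = str(n).strip()
--     if s == "00" and ROULETTE_VARIANT == "US":
--         return s
--     if s.isdigit() and 0 <= int(s) <= 36:
--         return str(int(s))
--     return ""
--
-- def _is_valid_sixline(selection: list[str]) -> bool:
--     if len(selection) != 6:
--         return False
--     vals = sorted(int(_normalize_num(s) or -1) for s in selection)
--     if vals[0] < 1:
--         return False
--     first = vals[0]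
--     needed = [first, first + 1, first + 2, first + 3, first + 4, first + 5]
--     return vals == needed and first % 3 == 1
-- ===== SOURCE B (Python) =====
-- from typing import Any
--
-- ROULETTE_VARIANT = "EU"
--
-- def _normalize_num(n: Any) -> str:
--     s = str(n).strip()
--     if s == "00" and ROULETTE_VARIANT == "US":
--         return s
--     if s.isdigit() and 0 <= int(s) <= 36:
--         return str(int(s))
--     return ""
--
-- def _is_valid_sixline(selection: list[str]) -> bool:
--     if len(selection) != 6:
--         return False
--     nums = [int(_normalize_num(s) or -1) for s in selection]
--     m = min(nums)
--     return m >= 1 and m % 3 == 1 and max(nums) - m == 5 and len(set(nums)) == 6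
-- ===== Notes on version B (the rewrite author's own statement) =====
-- stated objective: simpler
-- what changed: Replaces sorting the six normalized values and comparing against an explicitly built consecutive block with aggregate checks: min >= 1, min % 3 == 1, max - min == 5, and six distinct values.
import Mathlib
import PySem

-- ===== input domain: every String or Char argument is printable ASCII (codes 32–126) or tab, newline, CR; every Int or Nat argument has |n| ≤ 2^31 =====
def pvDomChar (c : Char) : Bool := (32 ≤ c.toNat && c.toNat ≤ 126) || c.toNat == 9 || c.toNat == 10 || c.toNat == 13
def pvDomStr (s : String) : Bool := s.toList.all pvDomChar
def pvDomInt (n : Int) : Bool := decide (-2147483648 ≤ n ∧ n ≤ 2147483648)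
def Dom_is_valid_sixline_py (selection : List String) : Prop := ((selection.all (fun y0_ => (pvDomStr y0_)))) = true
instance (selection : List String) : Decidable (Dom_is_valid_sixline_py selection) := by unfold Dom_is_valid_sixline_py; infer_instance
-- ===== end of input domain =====

-- B replaces sort-and-compare-to-an-explicit-block with aggregate checks (min, max, distinct count); objective: simpler, not faster.

-- ===== PORT A =====
def ROULETTE_VARIANT : String := "EU"

-- shared module helper _normalize_num (argument is always a str here, so str(n) = n)
def normalize_num (n : String) : String :=
  let s := PySem.Str.strip n
  if s == "00" && ROULETTE_VARIANT == "US" then s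
  else if PySem.Str.strIsdigit s then
    match PySem.Int.ofStr? s with
    | some v => if 0 ≤ v ∧ v ≤ 36 then PySem.Int.toStr v else ""
    | none => ""   -- unreachable: s is a nonempty digit string, so int(s) cannot raise
  else ""

-- int(_normalize_num(s) or -1): "" is falsy (and unparsable: ofStr? "" = none) → -1, else int of the digit string
def numVal (s : String) : Int := (PySem.Int.ofStr? (normalize_num s)).getD (-1)

def is_valid_sixline_py (selection : List String) : Bool :=
  if selection.length ≠ 6 then false
  else
    let vals := PySem.List.sorted (selection.map numVal) (fun x => x) false
    let first := (PySem.List.pyGet? vals 0).getD 0   -- vals[0]; vals has 6 elements, never raises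
    if first < 1 then false
    else
      let needed := [first, first + 1, first + 2, first + 3, first + 4, first + 5]
      (vals == needed) && (PySem.Int.mod first 3 == 1)

-- ===== PORT B =====
def is_valid_sixline_py_alt (selection : List String) : Bool :=
  if selection.length ≠ 6 then false
  else
    let nums := selection.map numVal
    let m := (PySem.List.min? nums (fun x => x)).getD 0   -- min(nums); nums nonempty
    decide (m ≥ 1) && (PySem.Int.mod m 3 == 1)
      && ((PySem.List.max? nums (fun x => x)).getD 0 - m == 5)
      && ((PySem.Set.ofList nums).length == 6)

-- ===== PRECONDITION & SPEC =====
def Spec_is_valid_sixline_py (selection : List String) (out : Bool) : Prop := out = is_valid_sixline_py_alt selection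
instance (selection : List String) (out : Bool) : Decidable (Spec_is_valid_sixline_py selection out) := by unfold Spec_is_valid_sixline_py; infer_instance

-- ===== CLAIM (what is proved, stated in full; the proofs are below) =====
def Claim_equal_is_valid_sixline_py : Prop := ∀ (selection : List String), Dom_is_valid_sixline_py selection → Spec_is_valid_sixline_py selection (is_valid_sixline_py selection)

-- ===== LEMMAS AND PROOFS =====

-- len(set(xs)) == len(xs) ↔ xs has no duplicates
theorem ofList_length_eq_iff_nodup (xs : List Int) :
    (PySem.Set.ofList xs).length = xs.length ↔ xs.Nodup := by
  constructor
  · intro h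
    have h1 := PySem.Set.nodup_ofList xs
    have h2 : PySem.Set.ofList xs ⊆ xs := fun y hy => (PySem.Set.mem_ofList xs y).mp hy
    have hsp : (PySem.Set.ofList xs).Subperm xs := h1.subperm h2
    exact ((hsp.perm_of_length_le (by omega)).symm.nodup_iff).mpr h1
  · intro h; rw [PySem.Set.ofList_eq_self_of_nodup xs h]

-- the heart: A's sorted-equals-block test coincides with B's aggregate test on any 6-element value list
theorem core_aux (nums s : List Int) (m M : Int)
    (hperm : s.Perm nums) (hpw : s.Pairwise (fun a b => a ≤ b))
    (hm : PySem.List.min? nums (fun x => x) = some m)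
    (hM : PySem.List.max? nums (fun x => x) = some M)
    (h6 : nums.length = 6) :
    (if (PySem.List.pyGet? s 0).getD 0 < 1 then false
     else
       let first := (PySem.List.pyGet? s 0).getD 0
       (s == [first, first + 1, first + 2, first + 3, first + 4, first + 5])
         && (PySem.Int.mod first 3 == 1))
    = (decide (m ≥ 1) && (PySem.Int.mod m 3 == 1)
        && (M - m == 5) && ((PySem.Set.ofList nums).length == 6)) := by
  have hlen : s.length = 6 := by rw [hperm.length_eq, h6]
  rcases s with _ | ⟨a, _ | ⟨b, _ | ⟨c, _ | ⟨d, _ | ⟨e, _ | ⟨f, _ | ⟨g, t⟩⟩⟩⟩⟩⟩⟩ <;>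
    simp only [List.length_nil, List.length_cons] at hlen <;> try omega
  -- s = [a,b,c,d,e,f]
  have hget : (PySem.List.pyGet? [a, b, c, d, e, f] 0).getD 0 = a := by
    simp [PySem.List.pyGet?, PySem.List.pyIdx?]
  have hmem_m : m ∈ [a, b, c, d, e, f] := hperm.mem_iff.mpr (PySem.List.min?_mem hm)
  have hmem_M : M ∈ [a, b, c, d, e, f] := hperm.mem_iff.mpr (PySem.List.max?_mem hM)
  have hma : m ≤ a := PySem.List.min?_isMin hm a (hperm.mem_iff.mp (by simp))
  have hMf : f ≤ M := PySem.List.max?_isMax hM f (hperm.mem_iff.mp (by simp))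
  simp at hpw
  simp at hmem_m hmem_M
  have hmeq : m = a := by rcases hmem_m with h|h|h|h|h|h <;> omega
  have hMeq : M = f := by rcases hmem_M with h|h|h|h|h|h <;> omega
  subst hmeq hMeq
  have hnd : (PySem.Set.ofList nums).length = 6 ↔ nums.Nodup := by
    rw [← h6]; exact ofList_length_eq_iff_nodup nums
  have hnd2 : nums.Nodup ↔ ([m, b, c, d, e, M] : List Int).Nodup := (hperm.nodup_iff).symm
  rw [hget, Bool.eq_iff_iff]
  by_cases hlt : m < 1
  · simp [hlt]
  · simp only [if_neg hlt]
    rw [show PySem.Int.mod m 3 = m % 3 from PySem.Int.mod_eq_emod_of_pos (by norm_num)]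
    by_cases hmod : m % 3 = 1
    · simp only [Bool.and_eq_true, beq_iff_eq, decide_eq_true_eq, hmod, List.cons.injEq,
        hnd, hnd2, List.nodup_cons, List.mem_cons, List.not_mem_nil, List.nodup_nil,
        not_or, and_true, true_and, not_false_eq_true]
      omega
    · simp [hmod]
  
-- ===== VERDICT (by name: the statement is the Claim_ definition above) =====
theorem is_valid_sixline_py_spec : Claim_equal_is_valid_sixline_py := by
  intro selection _
  unfold Spec_is_valid_sixline_py is_valid_sixline_py is_valid_sixline_py_alt
  by_cases hl : selection.length = 6
  · simp only [hl, ne_eq, not_true_eq_false, if_false]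
    set nums := selection.map numVal with hnums
    have h6 : nums.length = 6 := by rw [hnums, List.length_map, hl]
    obtain ⟨m, hm⟩ : ∃ m, PySem.List.min? nums (fun x => x) = some m := by
      cases h : PySem.List.min? nums (fun x => x) with
      | none => rw [PySem.List.min?_eq_none_iff] at h; rw [h] at h6; simp at h6
      | some m => exact ⟨m, rfl⟩
    obtain ⟨M, hM⟩ : ∃ M, PySem.List.max? nums (fun x => x) = some M := by
      cases h : PySem.List.max? nums (fun x => x) with
      | none => rw [PySem.List.max?_eq_none_iff] at h; rw [h] at h6; simp at h6
      | some M => exact ⟨M, rfl⟩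
    rw [hm, hM]
    exact core_aux nums _ m M (PySem.List.sorted_perm nums (fun x => x) false)
      (PySem.List.sorted_pairwise nums (fun x => x)) hm hM h6
  · simp [hl]
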